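-- pv_equiv track=rewrite | github.com/Boomexs/Chinese_checkers_webapp | server/board.py | get_last_non_none_elements
-- ===== SOURCE A (Python) =====
-- def get_last_non_none_elements(arr, length):
--     result = []
--     for item in reversed(arr):
--         if item is not None:
--             result.append(item)
--         if len(result) == length:
--             break
--     return result[::-1]
-- ===== SOURCE B (Python) =====
-- def get_last_non_none_elements(arr, length):
--     filtered = [x for x in arr if x is not None]
--     return filtered[-length:] if length > 0 else filtered
-- ===== Notes on version B (the rewrite author's own statement) =====
-- stated objective: simpler
-- what changed: Replace the reversed-iteration loop with early break and final reversal by a forward filter of all non-None elements followed by a tail slice (no limit when length <= 0).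
-- intended difference: When length == 0 and arr's last element is None (and arr contains some non-None element), A's 'len(result) == length' break fires before anything is collected and A returns [], although with any non-None last element it returns ALL non-None elements for length == 0; B uniformly returns all non-None elements for length <= 0, the 'no limit' reading A itself uses everywhere else. — e.g. on get_last_non_none_elements([some 1, none], 0): A returns [], B returns [1]
import Mathlib
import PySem

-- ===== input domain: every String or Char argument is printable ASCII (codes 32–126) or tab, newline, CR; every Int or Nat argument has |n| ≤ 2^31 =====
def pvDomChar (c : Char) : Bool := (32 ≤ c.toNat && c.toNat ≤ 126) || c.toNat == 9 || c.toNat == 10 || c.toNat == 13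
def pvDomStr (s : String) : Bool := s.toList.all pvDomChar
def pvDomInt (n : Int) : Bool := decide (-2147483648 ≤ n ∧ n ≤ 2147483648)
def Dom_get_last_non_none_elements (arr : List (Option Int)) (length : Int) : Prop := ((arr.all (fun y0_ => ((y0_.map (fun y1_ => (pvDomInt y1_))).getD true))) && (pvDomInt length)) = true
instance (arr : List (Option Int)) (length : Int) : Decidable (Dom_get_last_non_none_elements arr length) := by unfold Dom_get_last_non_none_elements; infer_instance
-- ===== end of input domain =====

-- B replaces A's reversed loop + early break + final reversal by a forward filter and a tail
-- slice (objective: simpler); return values only, no mutation involved.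

-- ===== PORT A =====
-- the 'for item in reversed(arr): … if len(result) == length: break' loop
def goA : List (Option Int) → List Int → Int → List Int
  | [], result, _ => result
  | item :: rest, result, length =>
    let result' := match item with
      | some x => result ++ [x]
      | none => result
    if (result'.length : Int) = length then result' else goA rest result' length

def get_last_non_none_elements (arr : List (Option Int)) (length : Int) : List Int :=
  (goA arr.reverse [] length).reverse

-- ===== PORT B =====
def get_last_non_none_elements_alt (arr : List (Option Int)) (length : Int) : List Int :=
  let filtered := arr.filterMap id
  if length > 0 then PySem.List.slice filtered (some (-length)) none else filtered

-- ===== PRECONDITION & SPEC =====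
-- When length == 0 and arr's last element is None (and arr contains some non-None element),
-- A's break fires before anything is collected and A returns [], although with any non-None
-- last element it returns ALL non-None elements for length == 0; B uniformly returns all
-- non-None elements for length <= 0, the 'no limit' reading A itself uses everywhere else.
def D_get_last_non_none_elements (arr : List (Option Int)) (length : Int) : Prop :=
  length = 0 ∧ arr.getLast? = some none ∧ arr.any Option.isSome = true
instance (arr : List (Option Int)) (length : Int) : Decidable (D_get_last_non_none_elements arr length) := by unfold D_get_last_non_none_elements; infer_instance

def Spec_get_last_non_none_elements (arr : List (Option Int)) (length : Int) (out : List Int) : Prop := ¬ D_get_last_non_none_elements arr length → out = get_last_non_none_elements_alt arr length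
instance (arr : List (Option Int)) (length : Int) (out : List Int) : Decidable (Spec_get_last_non_none_elements arr length out) := by unfold Spec_get_last_non_none_elements; infer_instance

def pvDiffWitness_get_last_non_none_elements : List (Option Int) × Int := ([some 1, none], 0)
def pvDiffWitnessOut_get_last_non_none_elements : (List Int) × (List Int) := ([], [1])

-- ===== CLAIM (what is proved, stated in full; the proofs are below) =====
def Claim_unchanged_get_last_non_none_elements : Prop := ∀ (arr : List (Option Int)) (length : Int), Dom_get_last_non_none_elements arr length → Spec_get_last_non_none_elements arr length (get_last_non_none_elements arr length)
def Claim_changed_get_last_non_none_elements : Prop := Dom_get_last_non_none_elements (pvDiffWitness_get_last_non_none_elements.1) (pvDiffWitness_get_last_non_none_elements.2) ∧ D_get_last_non_none_elements (pvDiffWitness_get_last_non_none_elements.1) (pvDiffWitness_get_last_non_none_elements.2) ∧ get_last_non_none_elements (pvDiffWitness_get_last_non_none_elements.1) (pvDiffWitness_get_last_non_none_elements.2) = pvDiffWitnessOut_get_last_non_none_elements.1 ∧ get_last_non_none_elements_alt (pvDiffWitness_get_last_non_none_elements.1) (pvDiffWitness_get_last_non_none_elements.2) = pvDiffWitnessOut_get_last_non_none_elements.2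 ∧ pvDiffWitnessOut_get_last_non_none_elements.1 ≠ pvDiffWitnessOut_get_last_non_none_elements.2
def Claim_exact_get_last_non_none_elements : Prop := ∀ (arr : List (Option Int)) (length : Int), Dom_get_last_non_none_elements arr length → D_get_last_non_none_elements arr length → get_last_non_none_elements arr length ≠ get_last_non_none_elements_alt arr length

-- ===== LEMMAS AND PROOFS =====

-- once the collected result is already longer than `length`, the break never fires
theorem goA_all (l : List (Option Int)) : ∀ (res : List Int) (length : Int),
    length < (res.length : Int) → goA l res length = res ++ l.filterMap id := by
  induction l with
  | nil => intro res length _; simp [goA]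
  | cons item rest ih =>
    intro res length h
    cases item with
    | none =>
      simp only [goA]
      rw [if_neg (by omega), ih res length h]
      simp
    | some x =>
      have hlen : ((res ++ [x]).length : Int) = (res.length : Int) + 1 := by
        simp
      simp only [goA]
      rw [if_neg (by omega), ih (res ++ [x]) length (by omega)]
      simp

-- with k more elements still wanted, A collects exactly the next k non-None elements
theorem goA_take (l : List (Option Int)) : ∀ (res : List Int) (k : Nat) (length : Int),
    0 < k → length = (res.length : Int) + (k : Int) →
    goA l res length = res ++ (l.filterMap id).take k := by
  induction l with
  | nil => intro res k length _ _; simp [goA]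
  | cons item rest ih =>
    intro res k length hk hl
    cases item with
    | none =>
      simp only [goA]
      rw [if_neg (by omega), ih res k length hk hl]
      simp
    | some x =>
      have hlen : ((res ++ [x]).length : Int) = (res.length : Int) + 1 := by
        simp
      simp only [goA]
      by_cases h1 : k = 1
      · subst h1
        rw [if_pos (by omega)]
        simp
      · rw [if_neg (by omega),
          ih (res ++ [x]) (k - 1) length (by omega) (by rw [hlen]; omega)]
        simp only [List.filterMap_cons, id_eq, List.append_assoc, List.singleton_append]
        rw [show k = (k - 1) + 1 by omega]
        simp [List.take_succ_cons]

theorem get_last_non_none_elements_spec : Claim_unchanged_get_last_non_none_elements := by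
  intro arr length _ hD
  unfold get_last_non_none_elements get_last_non_none_elements_alt
  by_cases hpos : length > 0
  · -- positive length: take length.toNat from the end
    rw [if_pos hpos]
    rw [goA_take arr.reverse [] length.toNat length (by omega) (by simp; omega)]
    rw [PySem.List.slice_some_none]
    rw [show -length = -((length.toNat : Nat) : Int) by omega,
      PySem.List.clampIdx_neg_natCast _ _ (by omega)]
    simp only [List.nil_append, List.filterMap_reverse]
    rw [List.take_reverse]
    simp
  · rw [if_neg hpos]
    rcases lt_or_eq_of_le (not_lt.mp hpos) with hneg | h0
    · -- negative length: break never fires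
      rw [goA_all arr.reverse [] length (by simpa using hneg)]
      simp [List.filterMap_reverse]
    · -- length = 0
      subst h0
      rcases hrev : arr.reverse with _ | ⟨item, rest⟩
      · have : arr = [] := by simpa using congrArg List.reverse hrev
        subst this; simp [goA]
      · have hlast : arr.getLast? = some item := by
          rw [← List.head?_reverse, hrev]; rfl
        cases item with
        | none =>
          -- A breaks at once; ¬D_ forces arr to have no non-None element
          have hempty : arr.filterMap id = [] := by
            rw [List.filterMap_eq_nil_iff]
            intro a ha
            by_contra hne
            refine hD ⟨rfl, hlast, List.any_eq_true.mpr ⟨a, ha, ?_⟩⟩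
            cases a with
            | none => exact (hne rfl).elim
            | some y => rfl
          have hA : goA (none :: rest) [] 0 = [] := by simp [goA]
          rw [hA, hempty]
          rfl
        | some x =>
          -- the first collected element makes the break condition 1 = 0, never true again
          have hA : goA (some x :: rest) [] 0 = [x] ++ rest.filterMap id := by
            simp only [goA]
            rw [if_neg (by simp)]
            exact goA_all rest [x] 0 (by simp)
          rw [hA]
          have hfil : arr.filterMap id = (x :: rest.filterMap id).reverse := by
            have h2 := congrArg (List.filterMap id) hrev
            simp only [List.filterMap_reverse, List.filterMap_cons] at h2
            simpa using congrArg List.reverse h2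
          rw [hfil]
          simp

-- ===== VERDICT (by name: the statement is the Claim_ definition above) =====
theorem get_last_non_none_elements_changed : Claim_changed_get_last_non_none_elements := by
  unfold Claim_changed_get_last_non_none_elements; decide

theorem get_last_non_none_elements_tight : Claim_exact_get_last_non_none_elements := by
  intro arr length _ hD
  obtain ⟨h0, hlast, hany⟩ := hD
  subst h0
  have hne : arr.filterMap id ≠ [] := by
    rcases List.any_eq_true.mp hany with ⟨a, ha, hsome⟩
    rcases Option.isSome_iff_exists.mp hsome with ⟨x, hx⟩
    intro h
    have := List.filterMap_eq_nil_iff.mp h _ ha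
    rw [hx] at this
    simp at this
  rcases hrev : arr.reverse with _ | ⟨item, rest⟩
  · have : arr = [] := by simpa using congrArg List.reverse hrev
    subst this; simp at hne
  · have hitem : item = none := by
      have h2 := List.head?_reverse (l := arr)
      rw [hrev, hlast] at h2
      exact Option.some_injective _ h2
    subst hitem
    unfold get_last_non_none_elements get_last_non_none_elements_alt
    rw [hrev]
    have hA : goA (none :: rest) [] 0 = [] := by
      simp [goA]
    rw [hA]
    simp only [List.reverse_nil]
    rw [if_neg (by omega : ¬ (0:Int) > 0)]
    exact fun h => hne h.symm
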